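-- pv_equiv track=rewrite | github.com/harel-coffee/nlp4if19-stalin-auto | train_preprocessing.py | span_label_annotations
-- ===== SOURCE A (Python) =====
-- from typing import Dict, List
--
-- def span_label_annotations(article: list, spans: Dict[str, List[int]]) -> list:
--     anns = ['O' for x in article]
--     for i, x in enumerate(article):
--         for l, lspans in spans.items():
--             for x in lspans:
--                 if i in lspans:
--                     anns[i] = 'I-' + l
--     return anns
-- ===== SOURCE B (Python) =====
-- def span_label_annotations(article: list, spans) -> list:
--     anns = ['O'] * len(article)
--     for l, lspans in spans.items():
--         lab = 'I-' + l
--         for j in lspans: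
--             if 0 <= j < len(anns):
--                 anns[j] = lab
--     return anns
-- ===== Notes on version B (the rewrite author's own statement) =====
-- stated objective: faster
-- what changed: Instead of scanning every label's span list for every article position (with a redundant inner repetition loop), B makes one pass over the span lists and writes each in-range position directly, later labels overwriting earlier ones.
import Mathlib
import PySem

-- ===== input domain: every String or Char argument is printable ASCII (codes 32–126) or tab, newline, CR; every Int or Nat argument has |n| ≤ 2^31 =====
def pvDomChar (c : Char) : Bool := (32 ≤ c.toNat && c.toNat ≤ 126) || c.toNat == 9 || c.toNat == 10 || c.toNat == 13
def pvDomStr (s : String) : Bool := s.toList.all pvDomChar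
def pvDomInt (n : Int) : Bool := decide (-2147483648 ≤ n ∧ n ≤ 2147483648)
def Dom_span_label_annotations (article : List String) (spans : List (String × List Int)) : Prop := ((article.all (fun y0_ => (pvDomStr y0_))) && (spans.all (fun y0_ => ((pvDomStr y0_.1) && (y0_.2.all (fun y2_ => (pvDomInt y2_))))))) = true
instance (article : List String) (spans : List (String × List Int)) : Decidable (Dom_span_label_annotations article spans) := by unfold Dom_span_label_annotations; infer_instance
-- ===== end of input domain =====

-- B replaces A's triple loop (for every position, rescan every span list, with a redundant
-- repetition over the span elements) by a single pass over the span lists that writes each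
-- in-range position directly, later labels overwriting earlier ones.

-- ===== PORT A =====
def span_label_annotations (article : List String) (spans : List (String × List Int)) : List String :=
  let anns := article.map (fun _ => "O")
  (List.range article.length).foldl
    (fun anns i =>
      spans.foldl
        (fun anns p =>
          p.2.foldl
            (fun anns _ =>
              if (i : Int) ∈ p.2 then anns.set i ("I-" ++ p.1) else anns)
            anns)
        anns)
    anns

-- ===== PORT B =====
def span_label_annotations_alt (article : List String) (spans : List (String × List Int)) : List String :=
  spans.foldl
    (fun anns p =>
      p.2.foldl
        (fun anns j =>
          if 0 ≤ j ∧ j < (anns.length : Int) then anns.set j.toNat ("I-" ++ p.1) else anns)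
        anns)
    (article.map (fun _ => "O"))

-- ===== PRECONDITION & SPEC =====
def Spec_span_label_annotations (article : List String) (spans : List (String × List Int)) (out : List String) : Prop := out = span_label_annotations_alt article spans
instance (article : List String) (spans : List (String × List Int)) (out : List String) : Decidable (Spec_span_label_annotations article spans out) := by unfold Spec_span_label_annotations; infer_instance

-- ===== CLAIM (what is proved, stated in full; the proofs are below) =====
def Claim_equal_span_label_annotations : Prop := ∀ (article : List String) (spans : List (String × List Int)), Dom_span_label_annotations article spans → Spec_span_label_annotations article spans (span_label_annotations article spans)

-- ===== LEMMAS AND PROOFS =====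

-- value at one position after processing all span lists, starting from s
def lastLab (i : Nat) (spans : List (String × List Int)) (s : String) : String :=
  spans.foldl (fun s p => if (i : Int) ∈ p.2 then "I-" ++ p.1 else s) s

-- A's middle loop (over spans) for one fixed position i
def midA (spans : List (String × List Int)) (i : Nat) (anns : List String) : List String :=
  spans.foldl
    (fun anns p =>
      p.2.foldl
        (fun anns _ =>
          if (i : Int) ∈ p.2 then anns.set i ("I-" ++ p.1) else anns)
        anns)
    anns

lemma lastLab_nil (i : Nat) (s : String) : lastLab i [] s = s := rfl

lemma lastLab_cons (i : Nat) (p : String × List Int) (rest : List (String × List Int))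
    (s : String) :
    lastLab i (p :: rest) s = lastLab i rest (if (i : Int) ∈ p.2 then "I-" ++ p.1 else s) := rfl

lemma opt_map_congr {α β : Type} (o : Option α) (f g : α → β)
    (h : ∀ a, o = some a → f a = g a) : o.map f = o.map g := by
  cases o <;> simp_all

lemma foldl_set_const (l : List Int) (a : List String) (i : Nat) (v : String)
    (c : Prop) [Decidable c] :
    l.foldl (fun a _ => if c then a.set i v else a) a
      = if c ∧ l ≠ [] then a.set i v else a := by
  induction l generalizing a with
  | nil => simp
  | cons x xs ih =>
    simp only [List.foldl_cons]
    by_cases hc : c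
    · rw [if_pos hc, ih]
      split <;> simp_all [List.set_set]
    · rw [if_neg hc, ih]
      simp [hc]

lemma midA_get (spans : List (String × List Int)) (i : Nat) (a : List String) (j : Nat) :
    (midA spans i a)[j]? = a[j]?.map (fun s => if j = i then lastLab i spans s else s) := by
  induction spans generalizing a with
  | nil =>
    simp only [midA, List.foldl_nil]
    cases h : a[j]? with
    | none => rfl
    | some s => simp [lastLab_nil]
  | cons p rest ih =>
    simp only [midA, List.foldl_cons] at *
    rw [foldl_set_const]
    by_cases hm : (i : Int) ∈ p.2
    · have hne : p.2 ≠ [] := List.ne_nil_of_mem hm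
      rw [if_pos ⟨hm, hne⟩, ih, List.getElem?_set]
      by_cases hij : i = j
      · subst hij
        by_cases hlt : i < a.length
        · simp [hlt, lastLab_cons, hm]
        · simp [hlt]
      · rw [if_neg hij]
        apply opt_map_congr
        intro s _
        have hji : j ≠ i := fun h => hij h.symm
        simp [hji]
    · rw [if_neg (by tauto), ih]
      apply opt_map_congr
      intro s _
      by_cases hij : j = i <;> simp [hij, lastLab_cons, hm]

lemma rangeA_get (spans : List (String × List Int)) (m : Nat) (a : List String) (j : Nat) :
    ((List.range m).foldl (fun a i => midA spans i a) a)[j]?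
      = a[j]?.map (fun s => if j < m then lastLab j spans s else s) := by
  induction m with
  | zero =>
    cases h : a[j]? <;> simp [h]
  | succ n ih =>
    rw [List.range_succ, List.foldl_append, List.foldl_cons, List.foldl_nil, midA_get, ih,
      Option.map_map]
    apply opt_map_congr
    intro s _
    simp only [Function.comp]
    by_cases hjn : j = n
    · subst hjn; simp
    · by_cases hlt : j < n
      · simp [hjn, hlt, Nat.lt_succ_of_lt hlt]
      · simp only [if_neg hjn, if_neg hlt, if_neg (by omega : ¬ j < n + 1)]

-- B's inner loop over one span list
lemma innerB_get (l : List Int) (a : List String) (v : String) (j : Nat) :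
    (l.foldl (fun a x => if 0 ≤ x ∧ x < (a.length : Int) then a.set x.toNat v else a) a)[j]?
      = a[j]?.map (fun s => if (j : Int) ∈ l then v else s) := by
  induction l generalizing a with
  | nil =>
    cases h : a[j]? <;> simp [h]
  | cons x xs ih =>
    rw [List.foldl_cons]
    by_cases hcond : 0 ≤ x ∧ x < (a.length : Int)
    · rw [if_pos hcond, ih, List.getElem?_set]
      by_cases hxj : x.toNat = j
      · have hjl : j < a.length := by omega
        have hmem : (j : Int) ∈ x :: xs := by
          have : x = (j : Int) := by omega
          simp [this]
        simp [hxj, hjl, hmem]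
      · rw [if_neg hxj]
        apply opt_map_congr
        intro s _
        have : (j : Int) ≠ x := by omega
        simp [List.mem_cons, this]
    · rw [if_neg hcond, ih]
      apply opt_map_congr
      intro s hs
      have hjl : j < a.length := (List.getElem?_eq_some_iff.mp hs).1
      have : (j : Int) ≠ x := by omega
      simp [List.mem_cons, this]

lemma foldB_get (spans : List (String × List Int)) (a : List String) (j : Nat) :
    (spans.foldl
      (fun anns p =>
        p.2.foldl
          (fun anns j =>
            if 0 ≤ j ∧ j < (anns.length : Int) then anns.set j.toNat ("I-" ++ p.1) else anns)
          anns)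
      a)[j]? = a[j]?.map (lastLab j spans) := by
  induction spans generalizing a with
  | nil =>
    simp only [List.foldl_nil]
    cases h : a[j]? with
    | none => rfl
    | some s => simp [lastLab_nil]
  | cons p rest ih =>
    rw [List.foldl_cons, ih, innerB_get, Option.map_map]
    apply opt_map_congr
    intro s _
    simp [Function.comp, lastLab_cons]

lemma spanA_eq (article : List String) (spans : List (String × List Int)) :
    span_label_annotations article spans
      = (List.range article.length).foldl (fun a i => midA spans i a)
          (article.map (fun _ => "O")) := rfl

lemma spanB_eq (article : List String) (spans : List (String × List Int)) :
    span_label_annotations_alt article spans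
      = spans.foldl
          (fun anns p =>
            p.2.foldl
              (fun anns j =>
                if 0 ≤ j ∧ j < (anns.length : Int) then anns.set j.toNat ("I-" ++ p.1) else anns)
              anns)
          (article.map (fun _ => "O")) := rfl

-- ===== VERDICT (by name: the statement is the Claim_ definition above) =====
theorem span_label_annotations_spec : Claim_equal_span_label_annotations := by
  intro article spans _
  unfold Spec_span_label_annotations
  apply List.ext_getElem?
  intro j
  rw [spanA_eq, spanB_eq, rangeA_get, foldB_get]
  by_cases hj : j < article.length
  · have : (article.map (fun _ => "O"))[j]? = some "O" := by
      simp [hj]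
    rw [this]
    simp [hj]
  · have : (article.map (fun _ => "O"))[j]? = none := by
      simp; omega
    rw [this]; rfl
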